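-- pv_equiv track=rewrite | github.com/simingt0/process_table | table_utils.py | deduplicate_headers
-- ===== SOURCE A (Python) =====
-- def deduplicate_headers(md_table: str) -> str:
--     """
--     Detects duplicate column headers in a Markdown table and renames them with _0, _1, _2... suffixes.
--
--     :param md_table: Markdown table as a string
--     :return: Modified Markdown table with unique headers
--     """
--     lines = md_table.strip().split("\n")
--     if len(lines) < 2:
--         return md_table  # Not enough lines to form a valid table
--
--     # Extract header line
--     headers = lines[0].split("|")[1:-1]  # Remove leading and trailing empty parts
--     separator = lines[1]
--
--     # Count occurrences to detect duplicates
--     counts = {}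
--     for header in headers:
--         header = header.strip()
--         counts[header] = counts.get(header, 0) + 1
--
--     # Rename only duplicate headers
--     seen = {}
--     new_headers = []
--
--     for header in headers:
--         header = header.strip()
--         if counts[header] > 1:  # Only rename if it appears more than once
--             if header in seen:
--                 seen[header] += 1
--             else:
--                 seen[header] = 0  # First appearance gets _0
--
--             new_header = f"{header}_{seen[header]}"  # Append _0, _1, _2...
--         else:
--             new_header = header  # Unique headers remain unchanged
--
--         new_headers.append(new_header)
--
--     # Reconstruct table
--     deduplicated_header_line = "| " + " | ".join(new_headers) + " |"
--
--     return "\n".join([deduplicated_header_line, separator] + lines[2:])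
-- ===== SOURCE B (Python) =====
-- def deduplicate_headers(md_table: str) -> str:
--     """Group columns by header name, then fill a result array group by group."""
--     lines = md_table.strip().split("\n")
--     if len(lines) < 2:
--         return md_table
--     headers = [h.strip() for h in lines[0].split("|")[1:-1]]
--     positions = {}
--     for i, h in enumerate(headers):
--         positions[h] = positions.get(h, []) + [i]
--     result = [""] * len(headers)
--     for name, idxs in positions.items():
--         if len(idxs) > 1:
--             for k, j in enumerate(idxs):
--                 result[j] = f"{name}_{k}"
--         else:
--             result[idxs[0]] = name
--     return "\n".join(["| " + " | ".join(result) + " |", lines[1]] + lines[2:])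
-- ===== Notes on version B (the rewrite author's own statement) =====
-- stated objective: alternative
-- what changed: Instead of A's column-by-column pass with a counts dict and a running occurrence-counter dict, B groups columns by header name into a name-to-index-list dict in one pass, then fills a preallocated result array group by group (writing name_k at the k-th stored index of each duplicated name, the bare name for singletons) and joins the array.
import Mathlib
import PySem

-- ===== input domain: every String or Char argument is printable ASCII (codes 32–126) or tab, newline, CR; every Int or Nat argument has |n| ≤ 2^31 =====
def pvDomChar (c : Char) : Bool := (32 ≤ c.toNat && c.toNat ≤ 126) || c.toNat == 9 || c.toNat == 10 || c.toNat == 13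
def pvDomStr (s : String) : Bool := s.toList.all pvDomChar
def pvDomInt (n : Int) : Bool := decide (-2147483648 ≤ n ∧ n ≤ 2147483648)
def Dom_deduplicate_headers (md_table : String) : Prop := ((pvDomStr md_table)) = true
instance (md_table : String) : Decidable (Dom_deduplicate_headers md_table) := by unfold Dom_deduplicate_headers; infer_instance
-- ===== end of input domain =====

-- B replaces A's column-by-column pass (counts dict + running occurrence-counter dict) by a group-and-fill
-- strategy: one pass groups column indices by header name into a dict, then each group writes
-- its renamed headers into a preallocated result array at its stored indices; objective: alternative.

-- ===== PORT A =====
def deduplicate_headers (md_table : String) : String :=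
  let lines := (PySem.Str.split? (PySem.Str.strip md_table) "\n").getD []
  if lines.length < 2 then md_table
  else
    let headers := PySem.List.slice ((PySem.Str.split? (PySem.List.pyGetD lines 0 "") "|").getD []) (some 1) (some (-1))
    let separator := PySem.List.pyGetD lines 1 ""
    let counts : PySem.Dict String Int :=
      headers.foldl (fun d header => d.modify (PySem.Str.strip header) 0 (· + 1)) PySem.Dict.empty
    let st :=
      headers.foldl (fun (st : PySem.Dict String Int × List String) header =>
        let header := PySem.Str.strip header
        if counts.getD header 0 > 1 then
          let seen := if st.1.contains header then st.1.modify header 0 (· + 1)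
                      else st.1.insert header 0
          (seen, st.2 ++ [header ++ "_" ++ PySem.Int.toStr (seen.getD header 0)])
        else
          (st.1, st.2 ++ [header]))
        (PySem.Dict.empty, [])
    let deduplicated_header_line := "| " ++ PySem.Str.join " | " st.2 ++ " |"
    PySem.Str.join "\n" ([deduplicated_header_line, separator] ++ PySem.List.slice lines (some 2) none)

-- ===== PORT B =====
-- the indices stored in `positions` come from enumerate, hence are nonnegative, so Python's
-- `result[j] = v` is exactly `List.set` at j.toNat here
def deduplicate_headers_alt (md_table : String) : String :=
  let lines := (PySem.Str.split? (PySem.Str.strip md_table) "\n").getD []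
  if lines.length < 2 then md_table
  else
    let headers := (PySem.List.slice ((PySem.Str.split? (PySem.List.pyGetD lines 0 "") "|").getD []) (some 1) (some (-1))).map PySem.Str.strip
    let positions : PySem.Dict String (List Int) :=
      (PySem.List.enumerate headers).foldl (fun d p => d.modify p.2 [] (· ++ [p.1])) PySem.Dict.empty
    let result :=
      positions.items.foldl (fun r q =>
        if q.2.length > 1 then
          (PySem.List.enumerate q.2).foldl
            (fun r p => r.set p.2.toNat (q.1 ++ "_" ++ PySem.Int.toStr p.1)) r
        else
          r.set (PySem.List.pyGetD q.2 0 0).toNat q.1)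
        (PySem.List.pyRepeat [""] (headers.length : Int))
    PySem.Str.join "\n" (["| " ++ PySem.Str.join " | " result ++ " |", PySem.List.pyGetD lines 1 ""] ++ PySem.List.slice lines (some 2) none)

-- ===== PRECONDITION & SPEC =====
def Spec_deduplicate_headers (md_table : String) (out : String) : Prop := out = deduplicate_headers_alt md_table
instance (md_table : String) (out : String) : Decidable (Spec_deduplicate_headers md_table out) := by unfold Spec_deduplicate_headers; infer_instance

-- ===== CLAIM (what is proved, stated in full; the proofs are below) =====
def Claim_equal_deduplicate_headers : Prop := ∀ (md_table : String), Dom_deduplicate_headers md_table → Spec_deduplicate_headers md_table (deduplicate_headers md_table)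

-- ===== LEMMAS AND PROOFS =====

-- A's per-header loop body, with the header already stripped (A's fold is this composed with strip).
def pvStep (counts : PySem.Dict String Int) (st : PySem.Dict String Int × List String)
    (header : String) : PySem.Dict String Int × List String :=
  if counts.getD header 0 > 1 then
    let seen := if st.1.contains header then st.1.modify header 0 (· + 1)
                else st.1.insert header 0
    (seen, st.2 ++ [header ++ "_" ++ PySem.Int.toStr (seen.getD header 0)])
  else
    (st.1, st.2 ++ [header])

-- The common target: column i of the deduplicated header row, as a closed form over the
-- stripped header list H (suffix = count of the header in the prefix before it).
def pvForm (H : List String) (q : Int × String) : String :=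
  if PySem.List.count H q.2 > 1 then
    q.2 ++ "_" ++ PySem.Int.toStr (PySem.List.count (PySem.List.slice H none (some q.1)) q.2)
  else q.2

-- B's group step: one (name, index-list) entry of `positions` applied to the result array.
def pvGroupStep (r : List String) (q : String × List Int) : List String :=
  if q.2.length > 1 then
    (PySem.List.enumerate q.2).foldl
      (fun r p => r.set p.2.toNat (q.1 ++ "_" ++ PySem.Int.toStr p.1)) r
  else
    r.set (PySem.List.pyGetD q.2 0 0).toNat q.1

-- B's index list for one name: the positions of `name` in H (via enumerate-filter).
def pvIdxs (H : List String) (name : String) : List Int :=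
  ((PySem.List.enumerate H 0).filter (fun p => p.2 == name)).map (fun p => p.1)

-- A-side loop invariant: after processing prefix p, for every header occurring more than once
-- in H, the counter dict holds (count in p) - 1 exactly when the header occurred in p.
theorem pvLoop (H : List String) (c : PySem.Dict String Int)
    (hc : ∀ h, c.getD h 0 = (H.count h : Int)) :
    ∀ (l p : List String) (seen : PySem.Dict String Int) (acc : List String),
    H = p ++ l →
    (∀ h, 1 < H.count h →
        (seen.contains h = true ↔ p.count h ≠ 0) ∧
        seen.getD h 0 = (if p.count h = 0 then 0 else (p.count h : Int) - 1)) →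
    (l.foldl (pvStep c) (seen, acc)).2 =
      acc ++ (PySem.List.enumerate l (p.length : Int)).map (pvForm H) := by
  intro l
  induction l with
  | nil => intro p seen acc _ _; simp [PySem.List.enumerate]
  | cons h t ih =>
    intro p seen acc hH hinv
    have hslice : PySem.List.slice H none (some (p.length : Int)) = p := by
      rw [PySem.List.slice_to_natCast, hH, List.take_left]
    have hlen1 : ((p ++ [h]).length : Int) = (p.length : Int) + 1 := by
      simp
    have hsame : ∀ h' : String, h' ≠ h → (p ++ [h]).count h' = p.count h' := by
      intro h' he
      simp [List.count_append, Ne.symm he]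
    have hself : (p ++ [h]).count h = p.count h + 1 := by
      simp [List.count_append]
    rw [List.foldl_cons, PySem.List.enumerate_cons, List.map_cons]
    by_cases hbig : 1 < H.count h
    · -- duplicated header: A appends h_"count in p", the closed form gives the same
      have hcond : c.getD h 0 > 1 := by rw [hc]; exact_mod_cast hbig
      obtain ⟨hcont, hval⟩ := hinv h hbig
      have hform : pvForm H ((p.length : Int), h) =
          h ++ "_" ++ PySem.Int.toStr (p.count h : Int) := by
        simp only [pvForm, PySem.List.count, hslice]
        rw [if_pos (by exact_mod_cast hbig)]
      by_cases h0 : p.count h = 0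
      · -- first occurrence: insert 0
        have hcf : seen.contains h = false := by
          rcases Bool.eq_false_or_eq_true (seen.contains h) with ht | hf
          · exact absurd (hcont.mp ht) (by simp [h0])
          · exact hf
        have hstep : pvStep c (seen, acc) h =
            (seen.insert h 0, acc ++ [h ++ "_" ++ PySem.Int.toStr 0]) := by
          simp [pvStep, hcond, hcf]
        rw [hstep, ih (p ++ [h]) _ _ (by simp [hH]) ?_, hform, h0, hlen1]
        · simp [List.append_assoc]
        · intro h' hb'
          obtain ⟨hc', hv'⟩ := hinv h' hb'
          by_cases he : h' = h
          · subst he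
            refine ⟨?_, ?_⟩
            · rw [hself]; simp
            · rw [PySem.Dict.getD_insert, if_pos rfl, hself, h0]
              norm_num
          · rw [hsame h' he]
            refine ⟨?_, ?_⟩
            · rw [PySem.Dict.contains_insert]
              have hne : (h' == h) = false := by simp [he]
              rw [hne]; simpa using hc'
            · rw [PySem.Dict.getD_insert, if_neg he]; exact hv'
      · -- repeat occurrence: modify +1
        have hct : seen.contains h = true := hcont.mpr h0
        have hgd : (seen.modify h 0 (· + 1)).getD h 0 = (p.count h : Int) := by
          rw [PySem.Dict.getD_modify, if_pos rfl, hval, if_neg h0]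
          ring
        have hstep : pvStep c (seen, acc) h =
            (seen.modify h 0 (· + 1),
              acc ++ [h ++ "_" ++ PySem.Int.toStr (p.count h : Int)]) := by
          simp [pvStep, hcond, hct, hgd]
        rw [hstep, ih (p ++ [h]) _ _ (by simp [hH]) ?_, hform, hlen1]
        · simp [List.append_assoc]
        · intro h' hb'
          obtain ⟨hc', hv'⟩ := hinv h' hb'
          by_cases he : h' = h
          · subst he
            refine ⟨?_, ?_⟩
            · rw [hself]; simp [PySem.Dict.contains_modify]
            · rw [PySem.Dict.getD_modify, if_pos rfl, hval, if_neg h0, hself]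
              rw [if_neg (by omega)]
              push_cast
              ring
          · rw [hsame h' he]
            refine ⟨?_, ?_⟩
            · rw [PySem.Dict.contains_modify]
              have hne : (h' == h) = false := by simp [he]
              rw [hne]; simpa using hc'
            · rw [PySem.Dict.getD_modify, if_neg he]; exact hv'
    · -- unique header: kept unchanged on both sides
      have hcond : ¬ (c.getD h 0 > 1) := by rw [hc]; exact_mod_cast hbig
      have hform : pvForm H ((p.length : Int), h) = h := by
        simp only [pvForm, PySem.List.count]
        rw [if_neg (by exact_mod_cast hbig)]
      have hstep : pvStep c (seen, acc) h = (seen, acc ++ [h]) := by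
        simp [pvStep, hcond]
      rw [hstep, ih (p ++ [h]) _ _ (by simp [hH]) ?_, hform, hlen1]
      · simp [List.append_assoc]
      · intro h' hb'
        obtain ⟨hc', hv'⟩ := hinv h' hb'
        have he : h' ≠ h := fun he => hbig (he ▸ hb')
        rw [hsame h' he]
        exact ⟨hc', hv'⟩

-- B-side: the k-th stored index of `name` is an index i with H[i] = name whose prefix holds
-- exactly k earlier occurrences of name.
theorem pvL1 (name : String) :
    ∀ (l : List String) (s : Int) (k : Nat) (j : Int),
      (((PySem.List.enumerate l s).filter (fun p => p.2 == name)).map (fun p => p.1))[k]? = some j →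
      ∃ (i : Nat) (hi : i < l.length), j = s + i ∧ l[i] = name ∧ (l.take i).count name = k := by
  intro l
  induction l with
  | nil => intro s k j h; simp [PySem.List.enumerate] at h
  | cons x t ih =>
    intro s k j h
    rw [PySem.List.enumerate_cons] at h
    by_cases hx : x = name
    · subst hx
      rw [List.filter_cons_of_pos (by simp)] at h
      cases k with
      | zero =>
        refine ⟨0, by simp, ?_, by simp, by simp⟩
        simp at h
        omega
      | succ k =>
        simp only [List.map_cons, List.getElem?_cons_succ] at h
        obtain ⟨i, hi, hj, hn, hk⟩ := ih (s + 1) k j h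
        refine ⟨i + 1, by simpa using hi, by push_cast; omega, by simpa using hn, ?_⟩
        simp [List.take_succ_cons, hk]
    · rw [List.filter_cons_of_neg (by simp [hx])] at h
      obtain ⟨i, hi, hj, hn, hk⟩ := ih (s + 1) k j h
      refine ⟨i + 1, by simpa using hi, by push_cast; omega, by simpa using hn, ?_⟩
      simp [List.take_succ_cons, hk, hx]

theorem pvMem_idxs (H : List String) (name : String) (i : Nat) (hi : i < H.length)
    (hname : H[i] = name) : (i : Int) ∈ pvIdxs H name := by
  unfold pvIdxs
  refine List.mem_map.mpr ⟨((0 : Int) + (i : Int), H[i]), ?_, by simp⟩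
  exact List.mem_filter.mpr ⟨(PySem.List.mem_enumerate_iff H 0 _).mpr ⟨i, hi, rfl⟩, by simp [hname]⟩

theorem pvMem_idxs_name (H : List String) (name : String) (i : Nat) (hi : i < H.length)
    (h : (i : Int) ∈ pvIdxs H name) : H[i] = name := by
  unfold pvIdxs at h
  obtain ⟨p, hp, hp1⟩ := List.mem_map.mp h
  obtain ⟨hpe, hpn⟩ := List.mem_filter.mp hp
  obtain ⟨k, hk, rfl⟩ := (PySem.List.mem_enumerate_iff H 0 _).mp hpe
  simp only [zero_add] at hp1
  have : i = k := by exact_mod_cast hp1.symm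
  subst this
  simpa using hpn

theorem pvIdxs_length (H : List String) (name : String) :
    (pvIdxs H name).length = H.count name := by
  unfold pvIdxs
  rw [List.length_map, ← List.countP_eq_length_filter]
  have h := List.countP_map (p := fun x => x == name) (f := fun p : Int × String => p.2)
    (l := PySem.List.enumerate H 0)
  rw [PySem.List.map_snd_enumerate] at h
  rw [List.count, h]
  rfl

-- Filling the result array at the stored indices: positions written get the target value,
-- other positions keep what they had.
theorem pvFill (T : List String) (f : Int → String) :
    ∀ (idl : List Int) (k0 : Int) (r : List String),
      r.length = T.length →
      (∀ (k : Nat) (j : Int), idl[k]? = some j →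
        ∃ (i : Nat) (hi : i < T.length), j = (i : Int) ∧ f (k0 + k) = T[i]) →
      (((PySem.List.enumerate idl k0).foldl (fun r p => r.set p.2.toNat (f p.1)) r).length = T.length ∧
       ∀ (i : Nat) (hi : i < T.length),
         ((PySem.List.enumerate idl k0).foldl (fun r p => r.set p.2.toNat (f p.1)) r)[i]?
           = if (i : Int) ∈ idl then T[i]? else r[i]?) := by
  intro idl
  induction idl with
  | nil => intro k0 r hlen _; simp [PySem.List.enumerate, hlen]
  | cons j rest ih =>
    intro k0 r hlen hval
    rw [PySem.List.enumerate_cons, List.foldl_cons]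
    obtain ⟨i0, hi0, hj, hf0⟩ := hval 0 j (by simp)
    have hone : f k0 = T[i0] := by simpa using hf0
    have hjnat : j.toNat = i0 := by rw [hj]; simp
    have hset : (r.set j.toNat (f k0)).length = T.length := by simp [hlen]
    obtain ⟨hlen', hget⟩ := ih (k0 + 1) (r.set j.toNat (f k0)) hset (fun k j' h => by
      obtain ⟨i, hi, hj', hfk⟩ := hval (k + 1) j' (by simpa using h)
      refine ⟨i, hi, hj', ?_⟩
      rw [← hfk]
      congr 1
      push_cast
      ring)
    refine ⟨hlen', fun i hi => ?_⟩
    rw [hget i hi]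
    by_cases hmem : (i : Int) ∈ rest
    · simp [hmem]
    · rw [if_neg hmem]
      by_cases hii : i = i0
      · subst hii
        rw [if_pos (by rw [hj]; exact List.mem_cons_self ..), hjnat,
          List.getElem?_set_self (by omega), hone, List.getElem?_eq_getElem hi0]
      · have hij : (i : Int) ≠ j := by rw [hj]; exact_mod_cast hii
        rw [if_neg (by simp [hij, hmem]), List.getElem?_set_ne (by omega)]

-- One group of `positions` writes exactly the target values at its indices.
theorem pvGroup_get (H : List String) (T : List String)
    (hT : T = (PySem.List.enumerate H 0).map (pvForm H)) (name : String) (hmem : name ∈ H)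
    (r : List String) (hlen : r.length = H.length) :
    (pvGroupStep r (name, pvIdxs H name)).length = H.length ∧
    ∀ (i : Nat) (hi : i < H.length),
      (pvGroupStep r (name, pvIdxs H name))[i]?
        = if (i : Int) ∈ pvIdxs H name then T[i]? else r[i]? := by
  have hTlen : T.length = H.length := by simp [hT]
  have hcnt : (pvIdxs H name).length = H.count name := pvIdxs_length H name
  have hTget : ∀ (i : Nat) (hi : i < H.length),
      T[i]? = some (pvForm H ((i : Int), H[i])) := by
    intro i hi
    rw [List.getElem?_eq_getElem (by omega)]
    simp [hT, PySem.List.getElem_enumerate]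
  by_cases hbig : 1 < H.count name
  · have hgt : (pvIdxs H name).length > 1 := by omega
    have hstep : pvGroupStep r (name, pvIdxs H name) =
        (PySem.List.enumerate (pvIdxs H name)).foldl
          (fun r p => r.set p.2.toNat (name ++ "_" ++ PySem.Int.toStr p.1)) r := by
      simp [pvGroupStep, hgt]
    obtain ⟨h1, h2⟩ := pvFill T (fun k => name ++ "_" ++ PySem.Int.toStr k) (pvIdxs H name) 0 r
      (by omega) (fun k j h => by
        obtain ⟨i, hi, hj, hn, hk⟩ := pvL1 name H 0 k j h
        refine ⟨i, (by omega : i < T.length), by omega, ?_⟩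
        have hTi : T[i]'(by omega) = pvForm H ((i : Int), H[i]'hi) := by
          have h' := hTget i hi
          rw [List.getElem?_eq_getElem (by omega)] at h'
          exact Option.some.inj h'
        rw [hTi, hn]
        simp only [pvForm, PySem.List.count, PySem.List.slice_to_natCast]
        rw [if_pos (by exact_mod_cast hbig), hk]
        simp)
    exact ⟨by rw [hstep]; omega, fun i hi => by rw [hstep]; exact h2 i (by omega)⟩
  · have h1 : H.count name = 1 :=
      le_antisymm (by omega) (List.one_le_count_iff.mpr hmem)
    have hl1 : (pvIdxs H name).length = 1 := by omega
    obtain ⟨j, hj⟩ := List.length_eq_one_iff.mp hl1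
    have hj0 : (pvIdxs H name)[0]? = some j := by simp [hj]
    obtain ⟨i0, hi0, hji, hn0, hk0⟩ := pvL1 name H 0 0 j hj0
    have hji' : j = (i0 : Int) := by omega
    have hstep : pvGroupStep r (name, pvIdxs H name) = r.set i0 name := by
      simp only [pvGroupStep, hl1]
      rw [if_neg (by omega), hj]
      rw [PySem.List.pyGetD_ofNat']
      simp [hji']
    have hTv : T[i0]? = some name := by
      rw [hTget i0 hi0]
      simp only [pvForm, PySem.List.count]
      rw [if_neg (by rw [hn0]; exact_mod_cast (by omega : ¬ (1 : Int) < (H.count name : Int)))]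
      rw [hn0]
    refine ⟨by simp [hstep, hlen], fun i hi => ?_⟩
    rw [hstep]
    by_cases hii : i = i0
    · subst hii
      rw [if_pos (by rw [hj, hji']; exact List.mem_singleton.mpr rfl)]
      rw [List.getElem?_set_self (by omega), hTv]
    · rw [if_neg (by rw [hj]; simp [hji']; exact_mod_cast hii),
        List.getElem?_set_ne (by omega)]

-- Processing the remaining groups makes every still-wrong position correct.
theorem pvOuter (H : List String) (T : List String)
    (hT : T = (PySem.List.enumerate H 0).map (pvForm H)) :
    ∀ (ns : List String) (r : List String),
      (∀ name ∈ ns, name ∈ H) →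
      r.length = H.length →
      (∀ (i : Nat) (hi : i < H.length), H[i] ∉ ns → r[i]? = T[i]?) →
      ns.foldl (fun r name => pvGroupStep r (name, pvIdxs H name)) r = T := by
  intro ns
  induction ns with
  | nil =>
    intro r _ hlen hinv
    have hTlen : T.length = H.length := by simp [hT]
    simp only [List.foldl_nil]
    apply List.ext_getElem?
    intro i
    by_cases hi : i < H.length
    · exact hinv i hi (by simp)
    · rw [List.getElem?_eq_none (by omega), List.getElem?_eq_none (by omega)]
  | cons name ns' ih =>
    intro r hns hlen hinv
    rw [List.foldl_cons]
    obtain ⟨hlen1, hget1⟩ := pvGroup_get H T hT name (hns name (List.mem_cons_self ..)) r hlen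
    refine ih _ (fun n h => hns n (List.mem_cons_of_mem _ h)) hlen1 ?_
    intro i hi hnot
    rw [hget1 i hi]
    by_cases hn : H[i] = name
    · rw [if_pos (pvMem_idxs H name i hi hn)]
    · rw [if_neg (fun hm => hn (pvMem_idxs_name H name i hi hm))]
      exact hinv i hi (by simp [hnot, hn])

-- ===== VERDICT (by name: the statement is the Claim_ definition above) =====
set_option maxHeartbeats 1000000 in
theorem deduplicate_headers_spec : Claim_equal_deduplicate_headers := by
  intro md_table _
  unfold Spec_deduplicate_headers
  set L := (PySem.Str.split? (PySem.Str.strip md_table) "\n").getD [] with hL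
  set R := PySem.List.slice ((PySem.Str.split? (PySem.List.pyGetD L 0 "") "|").getD []) (some 1) (some (-1)) with hR
  set C : PySem.Dict String Int :=
    R.foldl (fun d header => d.modify (PySem.Str.strip header) 0 (· + 1)) PySem.Dict.empty with hC
  set H := R.map PySem.Str.strip with hHdef
  set T := (PySem.List.enumerate H 0).map (pvForm H) with hTdef
  set P : PySem.Dict String (List Int) :=
    (PySem.List.enumerate H).foldl (fun d p => d.modify p.2 [] (· ++ [p.1])) PySem.Dict.empty with hP
  have hA : deduplicate_headers md_table =
      (if L.length < 2 then md_table else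
        PySem.Str.join "\n" (["| " ++ PySem.Str.join " | "
            ((R.foldl (fun st header => pvStep C st (PySem.Str.strip header))
              (PySem.Dict.empty, ([] : List String))).2) ++ " |",
          PySem.List.pyGetD L 1 ""] ++ PySem.List.slice L (some 2) none)) := rfl
  have hB : deduplicate_headers_alt md_table =
      (if L.length < 2 then md_table else
        PySem.Str.join "\n" (["| " ++ PySem.Str.join " | "
            (P.items.foldl (fun r q => pvGroupStep r q)
              (PySem.List.pyRepeat [""] (H.length : Int))) ++ " |",
          PySem.List.pyGetD L 1 ""] ++ PySem.List.slice L (some 2) none)) := rfl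
  rw [hA, hB]
  by_cases hlen : L.length < 2
  · rw [if_pos hlen, if_pos hlen]
  · rw [if_neg hlen, if_neg hlen]
    -- A's folded row is T
    have hcount : ∀ h, C.getD h 0 = (H.count h : Int) := by
      intro h
      have hfm : C = H.foldl (fun d x => d.modify x 0 (· + 1)) PySem.Dict.empty := by
        rw [hHdef, List.foldl_map]
      rw [hfm, PySem.Dict.getD_foldl_modify_add_one]
      have he0 : (PySem.Dict.empty : PySem.Dict String Int).getD h 0 = 0 := rfl
      rw [he0, zero_add]
    have hbase : ∀ h, 1 < H.count h →
        ((PySem.Dict.empty : PySem.Dict String Int).contains h = true ↔ ([] : List String).count h ≠ 0) ∧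
        (PySem.Dict.empty : PySem.Dict String Int).getD h 0 =
          (if ([] : List String).count h = 0 then 0 else ((([] : List String).count h : Int)) - 1) := by
      intro h _
      refine ⟨?_, ?_⟩
      · simp [PySem.Dict.contains_empty]
      · simp [PySem.Dict.getD, PySem.Dict.get?_empty]
    have hAlist :
        (R.foldl (fun st header => pvStep C st (PySem.Str.strip header))
          (PySem.Dict.empty, ([] : List String))).2 = T := by
      have hfold :
          (R.foldl (fun st header => pvStep C st (PySem.Str.strip header))
            (PySem.Dict.empty, ([] : List String))).2 =
          (H.foldl (pvStep C) (PySem.Dict.empty, ([] : List String))).2 := by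
        rw [hHdef, List.foldl_map]
      have hloop := pvLoop H C hcount H [] PySem.Dict.empty [] (by simp) hbase
      rw [hfold, hloop, hTdef]
      simp only [List.nil_append, List.length_nil, Nat.cast_zero]
    -- B's filled row is T
    have hkeys : P.keys = PySem.Set.ofList H := by
      rw [hP, PySem.Dict.keys_foldl_modify_key (PySem.List.enumerate H) (fun p => p.2) []
        (fun _ p => (· ++ [p.1])) PySem.Dict.empty]
      rw [PySem.Dict.keys_empty, PySem.Set.update_nil_left, PySem.List.map_snd_enumerate]
    have hnodup : P.keys.Nodup := by
      rw [hP]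
      exact PySem.Dict.nodup_keys_foldl_modify_key (PySem.List.enumerate H) (fun p => p.2) []
        (fun _ p => (· ++ [p.1])) PySem.Dict.empty PySem.Dict.nodup_keys_empty
    have hgetD : ∀ name, P.getD name [] = pvIdxs H name := by
      intro name
      have hswap : P = ((PySem.List.enumerate H).map (fun p => (p.2, p.1))).foldl
          (fun d p => d.modify p.1 [] (· ++ [p.2])) PySem.Dict.empty := by
        rw [hP, List.foldl_map]
      rw [hswap, PySem.Dict.getD_foldl_modify_append]
      simp [pvIdxs, List.filter_map, List.map_map, Function.comp_def]
    have hitems : P.items = (PySem.Set.ofList H).map (fun name => (name, pvIdxs H name)) := by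
      rw [PySem.Dict.items_eq_map_keys P hnodup [], hkeys]
      simp only [hgetD]
    have hBlist :
        P.items.foldl (fun r q => pvGroupStep r q)
          (PySem.List.pyRepeat [""] (H.length : Int)) = T := by
      rw [hitems, List.foldl_map, PySem.List.pyRepeat_singleton]
      apply pvOuter H T hTdef (PySem.Set.ofList H)
      · intro name hname
        exact (PySem.Set.mem_ofList H name).mp hname
      · rw [List.length_replicate, Int.toNat_natCast]
      · intro i hi hnot
        exact absurd ((PySem.Set.mem_ofList H _).mpr (List.getElem_mem hi)) hnot
    rw [hAlist, hBlist]
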